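-- pv_equiv track=rewrite | github.com/sislab-unitn/New-Event-Detection | tagger/model.py | replace_pad
-- ===== SOURCE A (Python) =====
-- def replace_pad(tgt_list):
--     for tgt in tgt_list:
--         count = 0
--         for idx in range(len(tgt)):
--             if tgt[idx] == -100:
--                 count += 1
--             if count >= 2:
--                 tgt[idx] = -100
--     return tgt_list
-- ===== SOURCE B (Python) =====
-- def replace_pad(tgt_list):
--     for tgt in tgt_list:
--         positions = [i for i, v in enumerate(tgt) if v == -100]
--         if len(positions) >= 2:
--             start = positions[1]
--             tgt[start:] = [-100] * (len(tgt) - start)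
--     return tgt_list
-- ===== Notes on version B (the rewrite author's own statement) =====
-- stated objective: simpler
-- what changed: Replaces A's interleaved count-and-overwrite index loop with two passes per list: collect the positions of -100, then slice-fill everything from the second such position.
import Mathlib
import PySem

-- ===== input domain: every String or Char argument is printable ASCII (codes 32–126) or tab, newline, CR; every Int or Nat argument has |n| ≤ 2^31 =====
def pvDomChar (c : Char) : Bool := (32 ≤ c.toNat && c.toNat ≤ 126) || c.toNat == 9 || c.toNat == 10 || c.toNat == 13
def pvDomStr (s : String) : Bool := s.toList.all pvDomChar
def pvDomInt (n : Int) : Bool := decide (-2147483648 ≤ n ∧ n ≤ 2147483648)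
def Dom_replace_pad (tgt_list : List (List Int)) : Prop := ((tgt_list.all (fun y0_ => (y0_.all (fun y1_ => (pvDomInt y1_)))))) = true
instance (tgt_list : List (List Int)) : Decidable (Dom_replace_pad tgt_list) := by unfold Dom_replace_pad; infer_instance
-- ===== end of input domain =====

-- B replaces A's interleaved count-and-overwrite loop by a find-the-second-(-100) pass
-- followed by a slice fill (objective: simpler). Both Pythons mutate the inner lists in
-- place and return the same outer object; the equivalence proved here is about the
-- returned value.

-- ===== PORT A =====
-- one step of A's inner `for idx in range(len(tgt))` loop; indices produced by range are
-- always in [0, len), so getD/set are exact for Python's tgt[idx] read and write here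
def aStep (st : Int × List Int) (idx : Nat) : Int × List Int :=
  let count := if st.2.getD idx 0 = -100 then st.1 + 1 else st.1
  let t := if 2 ≤ count then st.2.set idx (-100) else st.2
  (count, t)

def replace_pad (tgt_list : List (List Int)) : List (List Int) :=
  tgt_list.map (fun tgt => ((List.range tgt.length).foldl aStep (0, tgt)).2)

-- ===== PORT B =====
-- positions = [i for i, v in enumerate(tgt) if v == -100]
def bPositions (tgt : List Int) : List Nat :=
  (tgt.zipIdx.filter (fun p => p.1 = -100)).map (·.2)

-- tgt[start:] = [-100] * (len(tgt) - start), start = positions[1]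
def bInner (tgt : List Int) : List Int :=
  match bPositions tgt with
  | _ :: p1 :: _ => tgt.take p1 ++ List.replicate (tgt.length - p1) (-100)
  | _ => tgt

def replace_pad_alt (tgt_list : List (List Int)) : List (List Int) :=
  tgt_list.map bInner

-- ===== PRECONDITION & SPEC =====
def Spec_replace_pad (tgt_list : List (List Int)) (out : List (List Int)) : Prop := out = replace_pad_alt tgt_list
instance (tgt_list : List (List Int)) (out : List (List Int)) : Decidable (Spec_replace_pad tgt_list out) := by unfold Spec_replace_pad; infer_instance

-- ===== CLAIM (what is proved, stated in full; the proofs are below) =====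
def Claim_equal_replace_pad : Prop := ∀ (tgt_list : List (List Int)), Dom_replace_pad tgt_list → Spec_replace_pad tgt_list (replace_pad tgt_list)

-- ===== LEMMAS AND PROOFS =====

-- structural reference function: carries the running count like A's loop
def specGo (c : Int) : List Int → List Int
  | [] => []
  | x :: xs =>
    let c' := if x = -100 then c + 1 else c
    (if 2 ≤ c' then -100 else x) :: specGo c' xs

theorem aStep_shift (l : List Nat) : ∀ (c : Int) (y : Int) (ys : List Int),
    l.foldl (fun st i => aStep st (i + 1)) (c, y :: ys) =
      ((l.foldl aStep (c, ys)).1, y :: (l.foldl aStep (c, ys)).2) := by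
  induction l with
  | nil => intro c y ys; rfl
  | cons i l ih =>
    intro c y ys
    simp only [List.foldl_cons]
    have h : aStep (c, y :: ys) (i + 1) =
        ((aStep (c, ys) i).1, y :: (aStep (c, ys) i).2) := by
      simp only [aStep, List.getD_cons_succ, List.set_cons_succ]
      split <;> split <;> rfl
    rw [h, ih]

theorem a_eq_specGo : ∀ (t : List Int) (c : Int),
    ((List.range t.length).foldl aStep (c, t)).2 = specGo c t := by
  intro t
  induction t with
  | nil => intro c; rfl
  | cons x xs ih =>
    intro c
    have hr : List.range (x :: xs).length = 0 :: (List.range xs.length).map Nat.succ := by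
      simp [List.range_succ_eq_map]
    rw [hr]
    simp only [List.foldl_cons, List.foldl_map]
    have h0 : aStep (c, x :: xs) 0 =
        (if x = -100 then c + 1 else c,
         (if 2 ≤ (if x = -100 then c + 1 else c) then -100 else x) :: xs) := by
      by_cases hx : x = -100 <;>
        · simp only [aStep, List.getD_cons_zero, hx]
          split <;> split <;> simp_all
    rw [h0]
    have := aStep_shift (List.range xs.length)
      (if x = -100 then c + 1 else c)
      (if 2 ≤ (if x = -100 then c + 1 else c) then -100 else x) xs
    simp only [Nat.succ_eq_add_one] at this ⊢
    rw [this]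
    simp [specGo, ih]

theorem specGo_ge2 : ∀ (xs : List Int) (c : Int), 2 ≤ c →
    specGo c xs = List.replicate xs.length (-100) := by
  intro xs
  induction xs with
  | nil => intro c _; rfl
  | cons x xs ih =>
    intro c hc
    have hc' : 2 ≤ (if x = -100 then c + 1 else c) := by split <;> omega
    simp [specGo, hc', ih _ hc', List.replicate_succ]

theorem bPositions_cons (x : Int) (xs : List Int) :
    bPositions (x :: xs) =
      (if x = -100 then [0] else []) ++ (bPositions xs).map (· + 1) := by
  have key : ∀ (ys : List Int) (k : Nat),
      ((ys.zipIdx k).filter (fun p => p.1 = -100)).map (·.2) =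
        (((ys.zipIdx 0).filter (fun p => p.1 = -100)).map (·.2)).map (· + k) := by
    intro ys
    induction ys with
    | nil => intro k; rfl
    | cons y ys ih =>
      intro k
      by_cases hy : y = -100 <;>
        simp [List.zipIdx_cons, hy, ih (k + 1), ih 1,
          List.map_map, Function.comp_def, Nat.add_comm, Nat.add_left_comm]
  by_cases hx : x = -100 <;>
    simp [bPositions, List.zipIdx_cons, hx, key xs 1]

theorem bPositions_nil_iff (xs : List Int) :
    bPositions xs = [] ↔ ∀ a ∈ xs, a ≠ -100 := by
  simp only [bPositions, List.map_eq_nil_iff, List.filter_eq_nil_iff]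
  constructor
  · intro h a ha hcontra
    obtain ⟨i, hi⟩ := List.mem_iff_getElem.mp ha
    obtain ⟨hilen, hget⟩ := hi
    have hmem : (a, i) ∈ xs.zipIdx := by
      rw [List.mem_zipIdx_iff_getElem?]
      simp [List.getElem?_eq_getElem hilen, hget]
    have := h _ hmem
    simp [hcontra] at this
  · intro h p hp
    have := List.fst_mem_of_mem_zipIdx (l := xs) hp
    simpa using h _ this

theorem specGo_lt2_no (xs : List Int) (c : Int) (hc : c < 2)
    (h : ∀ a ∈ xs, a ≠ -100) : specGo c xs = xs := by
  induction xs with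
  | nil => rfl
  | cons x xs ih =>
    have hx : x ≠ -100 := h x (by simp)
    have : ¬ 2 ≤ c := by omega
    simp [specGo, hx, this, ih (fun a ha => h a (by simp [ha]))]

theorem specGo1_char : ∀ (xs : List Int) (k : Nat) (rest : List Nat),
    bPositions xs = k :: rest →
    specGo 1 xs = xs.take k ++ List.replicate (xs.length - k) (-100) := by
  intro xs
  induction xs with
  | nil => intro k rest h; simp [bPositions] at h
  | cons x xs ih =>
    intro k rest h
    rw [bPositions_cons] at h
    by_cases hx : x = -100
    · simp [hx] at h
      obtain ⟨hk, -⟩ := h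
      subst hk
      have h2 : (2 : Int) ≤ 1 + 1 := by norm_num
      simp [specGo, hx, specGo_ge2 xs 2 (by norm_num), List.replicate_succ]
    · simp [hx] at h
      rcases hmap : bPositions xs with _ | ⟨k0, rest0⟩
      · rw [hmap] at h; simp at h
      · rw [hmap] at h
        simp at h
        obtain ⟨hk, -⟩ := h
        have := ih k0 rest0 hmap
        simp [specGo, hx, this, ← hk, List.take_succ_cons]

theorem specGo0_char : ∀ (xs : List Int) (k0 k1 : Nat) (rest : List Nat),
    bPositions xs = k0 :: k1 :: rest →
    specGo 0 xs = xs.take k1 ++ List.replicate (xs.length - k1) (-100) := by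
  intro xs
  induction xs with
  | nil => intro k0 k1 rest h; simp [bPositions] at h
  | cons x xs ih =>
    intro k0 k1 rest h
    rw [bPositions_cons] at h
    by_cases hx : x = -100
    · simp [hx] at h
      obtain ⟨-, htail⟩ := h
      rcases hmap : bPositions xs with _ | ⟨m, rest0⟩
      · rw [hmap] at htail; simp at htail
      · rw [hmap] at htail
        simp at htail
        obtain ⟨hm, -⟩ := htail
        have := specGo1_char xs m rest0 hmap
        simp [specGo, hx, this, ← hm, List.take_succ_cons]
    · simp [hx] at h
      rcases hmap : bPositions xs with _ | ⟨m0, mrest⟩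
      · rw [hmap] at h; simp at h
      · rw [hmap] at h
        rcases mrest with _ | ⟨m1, mrest2⟩
        · simp at h
        · simp at h
          obtain ⟨-, hm1, -⟩ := h
          have := ih m0 m1 mrest2 hmap
          simp [specGo, hx, this, ← hm1, List.take_succ_cons]

theorem specGo0_small (xs : List Int)
    (h : ∀ k0 k1 rest, bPositions xs ≠ k0 :: k1 :: rest) : specGo 0 xs = xs := by
  induction xs with
  | nil => rfl
  | cons x xs ih =>
    by_cases hx : x = -100
    · rcases hmap : bPositions xs with _ | ⟨m, rest⟩
      · have hno := (bPositions_nil_iff xs).mp hmap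
        simp [specGo, hx, specGo_lt2_no xs 1 (by norm_num) hno]
      · exfalso
        exact h 0 (m + 1) (rest.map (· + 1)) (by simp [bPositions_cons, hx, hmap])
    · rcases hmap : bPositions xs with _ | ⟨m, rest⟩
      · have := ih (fun k0 k1 rest hcon => by rw [hmap] at hcon; simp at hcon)
        simp [specGo, hx, this]
      · rcases rest with _ | ⟨m1, rest2⟩
        · have := ih (fun k0 k1 rest hcon => by rw [hmap] at hcon; simp at hcon)
          simp [specGo, hx, this]
        · exfalso
          exact h (m + 1) (m1 + 1) (rest2.map (· + 1))
            (by simp [bPositions_cons, hx, hmap])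

theorem bInner_eq_specGo (xs : List Int) : bInner xs = specGo 0 xs := by
  unfold bInner
  rcases hmap : bPositions xs with _ | ⟨k0, rest⟩
  · exact (specGo0_small xs (fun k0 k1 r hcon => by rw [hmap] at hcon; simp at hcon)).symm
  · rcases rest with _ | ⟨k1, rest2⟩
    · exact (specGo0_small xs (fun a b r hcon => by rw [hmap] at hcon; simp at hcon)).symm
    · exact (specGo0_char xs k0 k1 rest2 hmap).symm

-- ===== VERDICT (by name: the statement is the Claim_ definition above) =====
theorem replace_pad_spec : Claim_equal_replace_pad := by
  intro tgt_list _
  unfold Spec_replace_pad replace_pad replace_pad_alt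
  apply List.map_congr_left
  intro tgt _
  rw [a_eq_specGo, bInner_eq_specGo]
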